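-- pv_equiv track=rewrite | github.com/ShuvalovAnthony/ez_python | Pavel/23/123.py | f
-- ===== SOURCE A (Python) =====
-- def f(start, stop):
--     if (start < stop) or (start == 8):
--         return 0
--     if start == stop:
--         return 1
--
--     return (
--         f(start - 1, stop) +
--         f(start - 4, stop) +
--         f(start // 3, stop)
--     )
-- ===== SOURCE B (Python) =====
-- def f(start, stop):
--     # Bottom-up DP over the value range [stop, start]: one table entry per value.
--     if start < stop or start == 8:
--         return 0
--     t = {}
--     for v in range(stop, start + 1):
--         if v == 8:
--             t[v] = 0
--         elif v == stop:
--             t[v] = 1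
--         else:
--             t[v] = t.get(v - 1, 0) + t.get(v - 4, 0) + t.get(v // 3, 0)
--     return t[start]
-- ===== Notes on version B (the rewrite author's own statement) =====
-- stated objective: alternative
-- what changed: Replaced A's top-down three-way recursion by a bottom-up dynamic-programming table over the value range [stop, start], computing each value once.
import Mathlib
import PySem

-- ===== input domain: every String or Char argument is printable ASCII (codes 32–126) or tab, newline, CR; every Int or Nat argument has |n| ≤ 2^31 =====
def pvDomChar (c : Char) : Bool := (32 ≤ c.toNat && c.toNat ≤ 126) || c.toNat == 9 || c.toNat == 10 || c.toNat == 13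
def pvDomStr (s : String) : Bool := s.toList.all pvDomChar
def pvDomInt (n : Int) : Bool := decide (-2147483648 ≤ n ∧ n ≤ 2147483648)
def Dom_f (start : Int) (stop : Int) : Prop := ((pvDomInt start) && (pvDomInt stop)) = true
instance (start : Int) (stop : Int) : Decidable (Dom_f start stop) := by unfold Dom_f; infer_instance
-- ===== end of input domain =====

-- B computes the same count with a bottom-up DP table over [stop, start] instead of A's three-way recursion.

-- ===== PORT A =====
-- A's recursion, with a fuel parameter that only makes it total in Lean: on every input
-- admitted by Pre_f the recursion depth is below the fuel (each recursive call strictly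
-- decreases start - stop there), so fAux computes exactly A's recursion.
def fAux : Nat → Int → Int → Int
  | 0, _, _ => 0
  | fuel + 1, start, stop =>
    if start < stop ∨ start = 8 then 0
    else if start = stop then 1
    else fAux fuel (start - 1) stop + fAux fuel (start - 4) stop
         + fAux fuel (PySem.Int.floordiv start 3) stop

def f (start : Int) (stop : Int) : Int := fAux ((start - stop).toNat + 1) start stop

-- ===== PORT B =====
def f_alt (start : Int) (stop : Int) : Int :=
  if start < stop ∨ start = 8 then 0
  else
    let t : PySem.Dict Int Int :=
      (PySem.List.pyRange stop (start + 1) 1).foldl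
        (fun t v =>
          if v = 8 then t.insert v 0
          else if v = stop then t.insert v 1
          else t.insert v (t.getD (v - 1) 0 + t.getD (v - 4) 0
                           + t.getD (PySem.Int.floordiv v 3) 0))
        PySem.Dict.empty
    -- t[start]: on this branch stop ≤ start, so the key is always present; ported via getD
    t.getD start 0

-- ===== PRECONDITION & SPEC =====
-- Pre_f excludes exactly the inputs on which A raises RecursionError (stop < start with
-- stop < 0 and start ≠ 8: the v//3 chain loops at the fixed points 0 and -1 forever).
def Pre_f (start : Int) (stop : Int) : Prop :=
  start < stop ∨ start = 8 ∨ start = stop ∨ 0 ≤ stop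
instance (start : Int) (stop : Int) : Decidable (Pre_f start stop) := by
  unfold Pre_f; infer_instance

def pvWitness_f : Int × Int := (10, 0)

def Spec_f (start : Int) (stop : Int) (out : Int) : Prop := out = f_alt start stop
instance (start : Int) (stop : Int) (out : Int) : Decidable (Spec_f start stop out) := by
  unfold Spec_f; infer_instance

-- ===== CLAIM (what is proved, stated in full; the proofs are below) =====
def Claim_equal_f : Prop :=
  ∀ (start : Int) (stop : Int), Dom_f start stop → Pre_f start stop →
    Spec_f start stop (f start stop)

-- ===== LEMMAS AND PROOFS =====

-- On the terminating region (0 ≤ stop) the result does not depend on the fuel,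
-- as long as the fuel exceeds the recursion measure (start - stop).toNat.
lemma fAux_stab (stop : Int) (hstop : 0 ≤ stop) :
    ∀ (n m : Nat) (start : Int), (start - stop).toNat < n → (start - stop).toNat < m →
      fAux n start stop = fAux m start stop := by
  intro n
  induction n with
  | zero => intro m start hn; omega
  | succ n ih =>
    intro m start hn hm
    obtain ⟨k, rfl⟩ : ∃ k, m = k + 1 := ⟨m - 1, by omega⟩
    simp only [fAux]
    by_cases h1 : start < stop ∨ start = 8
    · simp [h1]
    · simp only [h1, if_false]
      by_cases h2 : start = stop
      · simp [h2]
      · simp only [h2, if_false]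
        have hgt : stop < start := by omega
        rw [PySem.Int.floordiv_eq_ediv_of_pos (by norm_num : (0:Int) < 3)]
        rw [ih k (start - 1) (by omega) (by omega),
            ih k (start - 4) (by omega) (by omega),
            ih k (start / 3) (by omega) (by omega)]

lemma f_base_lt (start stop : Int) (h : start < stop ∨ start = 8) : f start stop = 0 := by
  simp [f, fAux, h]

lemma f_self (stop : Int) (h : stop ≠ 8) : f stop stop = 1 := by
  simp [f, fAux, h]

lemma f_unfold (start stop : Int) (hstop : 0 ≤ stop)
    (h1 : ¬ (start < stop ∨ start = 8)) (h2 : start ≠ stop) :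
    f start stop =
      f (start - 1) stop + f (start - 4) stop + f (PySem.Int.floordiv start 3) stop := by
  have hgt : stop < start := by omega
  show fAux ((start - stop).toNat + 1) start stop = _
  simp only [fAux, h1, h2, if_false]
  rw [PySem.Int.floordiv_eq_ediv_of_pos (by norm_num : (0:Int) < 3)]
  unfold f
  rw [fAux_stab stop hstop ((start - stop).toNat) ((start - 1 - stop).toNat + 1)
        (start - 1) (by omega) (by omega),
      fAux_stab stop hstop ((start - stop).toNat) ((start - 4 - stop).toNat + 1)
        (start - 4) (by omega) (by omega),
      fAux_stab stop hstop ((start - stop).toNat) ((start / 3 - stop).toNat + 1)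
        (start / 3) (by omega) (by omega)]

-- a name for B's loop body (definitionally equal to the lambda in f_alt)
def dpStep (stop : Int) (t : PySem.Dict Int Int) (v : Int) : PySem.Dict Int Int :=
  if v = 8 then t.insert v 0
  else if v = stop then t.insert v 1
  else t.insert v (t.getD (v - 1) 0 + t.getD (v - 4) 0
                   + t.getD (PySem.Int.floordiv v 3) 0)

lemma getD_dpStep (stop : Int) (d : PySem.Dict Int Int) (w k : Int) :
    (dpStep stop d w).getD k 0 =
      if k = w then
        (if w = 8 then 0 else if w = stop then 1
         else d.getD (w - 1) 0 + d.getD (w - 4) 0 + d.getD (PySem.Int.floordiv w 3) 0)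
      else d.getD k 0 := by
  unfold dpStep
  rcases eq_or_ne w 8 with h8 | h8
  · subst h8; simp [PySem.Dict.getD_insert]
  · rcases eq_or_ne w stop with hs | hs
    · subst hs; simp [PySem.Dict.getD_insert, h8]
    · simp [PySem.Dict.getD_insert, h8, hs]

-- Invariant of B's table: after processing [stop, v) every processed key holds A's value.
lemma dp_inv (stop : Int) (hstop : 0 ≤ stop) :
    ∀ (n : Nat) (v : Int), (v - stop).toNat = n → stop ≤ v →
      ∀ k, ((PySem.List.pyRange stop v 1).foldl (dpStep stop) PySem.Dict.empty).getD k 0 =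
        if k < v then f k stop else 0 := by
  intro n
  induction n with
  | zero =>
    intro v hv hle k
    rw [PySem.List.pyRange_one_eq_nil (by omega)]
    simp only [List.foldl_nil, PySem.Dict.getD_empty]
    split_ifs with h
    · exact (f_base_lt k stop (Or.inl (by omega))).symm
    · rfl
  | succ n ih =>
    intro v hv hle k
    obtain ⟨w, rfl⟩ : ∃ w, v = w + 1 := ⟨v - 1, by omega⟩
    have hws' : stop ≤ w := by omega
    rw [PySem.List.pyRange_one_succ_right hws', List.foldl_append]
    simp only [List.foldl_cons, List.foldl_nil]
    rw [getD_dpStep]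
    have IH := ih w (by omega) hws'
    by_cases hk : k = w
    · subst hk
      rw [if_pos rfl, if_pos (by omega : k < k + 1)]
      by_cases h8 : k = 8
      · rw [if_pos h8, h8, f_base_lt 8 stop (Or.inr rfl)]
      · rw [if_neg h8]
        by_cases hks : k = stop
        · rw [if_pos hks, hks, f_self stop (by omega)]
        · rw [if_neg hks]
          have hk1 : (1:Int) ≤ k := by omega
          have hdiv : PySem.Int.floordiv k 3 < k := by
            rw [PySem.Int.floordiv_eq_ediv_of_pos (by norm_num : (0:Int) < 3)]
            omega
          rw [IH (k - 1), IH (k - 4), IH (PySem.Int.floordiv k 3),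
              if_pos (by omega : k - 1 < k), if_pos (by omega : k - 4 < k), if_pos hdiv]
          exact (f_unfold k stop hstop (by omega) hks).symm
    · rw [if_neg hk, IH k]
      by_cases hlt2 : k < w
      · rw [if_pos hlt2, if_pos (by omega : k < w + 1)]
      · rw [if_neg hlt2, if_neg (by omega : ¬ k < w + 1)]

-- ===== VERDICT (by name: the statement is the Claim_ definition above) =====
theorem f_spec : Claim_equal_f := by
  intro start stop _ hpre
  unfold Spec_f f_alt
  by_cases h1 : start < stop ∨ start = 8
  · simp only [h1, if_true]
    exact f_base_lt start stop h1
  · simp only [h1, if_false]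
    have hfun : (fun (t : PySem.Dict Int Int) (v : Int) =>
        if v = 8 then t.insert v 0
        else if v = stop then t.insert v 1
        else t.insert v (t.getD (v - 1) 0 + t.getD (v - 4) 0
                         + t.getD (PySem.Int.floordiv v 3) 0)) = dpStep stop := rfl
    rw [hfun]
    by_cases hss : start = stop
    · subst hss
      rw [PySem.List.pyRange_one_succ_right (by omega), PySem.List.pyRange_one_eq_nil (by omega)]
      simp only [List.nil_append, List.foldl_cons, List.foldl_nil]
      rw [getD_dpStep, if_pos rfl, if_neg (by tauto : ¬ start = 8), if_pos rfl,
          f_self start (by tauto)]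
    · have hstop : 0 ≤ stop := by
        rcases hpre with h | h | h | h
        · exact absurd (Or.inl h) h1
        · exact absurd (Or.inr h) h1
        · exact absurd h hss
        · exact h
      have hle : stop ≤ start := by omega
      rw [dp_inv stop hstop ((start + 1 - stop).toNat) (start + 1) rfl (by omega) start,
          if_pos (by omega : start < start + 1)]
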